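-- pv_equiv track=rewrite | github.com/SamirVarma01/PLPredictions | premier-league-predict.py | get_streak_stats
-- ===== SOURCE A (Python) =====
-- def get_streak_stats(results):
--     """Calculate streak-based statistics from recent results."""
--     if not results:
--         return {
--             "win_streak": 0,
--             "loss_streak": 0,
--             "unbeaten_streak": 0,
--             "winless_streak": 0,
--         }
--
--     current_win_streak = 0
--     current_loss_streak = 0
--     current_unbeaten_streak = 0
--     current_winless_streak = 0
--
--     # Calculate current streaks
--     for result in results:
--         if result == 1:  # Win
--             current_win_streak += 1
--             current_loss_streak = 0
--             current_unbeaten_streak += 1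
--             current_winless_streak = 0
--         elif result == -1:  # Loss
--             current_win_streak = 0
--             current_loss_streak += 1
--             current_unbeaten_streak = 0
--             current_winless_streak += 1
--         else:  # Draw
--             current_win_streak = 0
--             current_loss_streak = 0
--             current_unbeaten_streak += 1
--             current_winless_streak += 1
--
--     return {
--         "win_streak": current_win_streak,
--         "loss_streak": current_loss_streak,
--         "unbeaten_streak": current_unbeaten_streak,
--         "winless_streak": current_winless_streak,
--     }
-- ===== SOURCE B (Python) =====
-- def _trailing(rs, pred):
--     n = 0
--     for r in reversed(rs):
--         if not pred(r):
--             break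
--         n += 1
--     return n
--
-- def get_streak_stats(results):
--     """Calculate streak-based statistics from recent results."""
--     rs = list(results)
--     return {
--         "win_streak": _trailing(rs, lambda r: r == 1),
--         "loss_streak": _trailing(rs, lambda r: r == -1),
--         "unbeaten_streak": _trailing(rs, lambda r: r != -1),
--         "winless_streak": _trailing(rs, lambda r: r != 1),
--     }
-- ===== Notes on version B (the rewrite author's own statement) =====
-- stated objective: simpler
-- what changed: Replaces the single forward fold over four mutable reset-on-opposite counters by computing each streak independently as the length of the trailing run of results satisfying its predicate (scanning from the end), which also makes the empty-input guard unnecessary.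
import Mathlib
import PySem

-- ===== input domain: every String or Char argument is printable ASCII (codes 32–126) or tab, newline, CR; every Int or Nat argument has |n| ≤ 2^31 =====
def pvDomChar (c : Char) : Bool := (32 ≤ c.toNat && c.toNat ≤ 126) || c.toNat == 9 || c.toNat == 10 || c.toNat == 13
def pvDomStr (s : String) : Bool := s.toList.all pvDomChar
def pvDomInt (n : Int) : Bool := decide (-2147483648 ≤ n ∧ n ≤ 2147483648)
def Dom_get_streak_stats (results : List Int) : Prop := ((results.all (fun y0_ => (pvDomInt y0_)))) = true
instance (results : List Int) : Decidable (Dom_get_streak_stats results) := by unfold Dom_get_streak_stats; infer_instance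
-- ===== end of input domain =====

-- B computes each streak independently as the trailing-run length under its predicate (simpler decomposition; same O(n) cost).

-- ===== PORT A =====
-- A: one forward pass over four counters that reset on opposite results.
def get_streak_stats (results : List Int) : List (String × Int) :=
  if results = [] then
    [("win_streak", 0), ("loss_streak", 0), ("unbeaten_streak", 0), ("winless_streak", 0)]
  else
    let s := results.foldl
      (fun (st : Int × Int × Int × Int) r =>
        if r = 1 then (st.1 + 1, 0, st.2.2.1 + 1, 0)
        else if r = -1 then (0, st.2.1 + 1, 0, st.2.2.2 + 1)
        else (0, 0, st.2.2.1 + 1, st.2.2.2 + 1))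
      (0, 0, 0, 0)
    [("win_streak", s.1), ("loss_streak", s.2.1),
     ("unbeaten_streak", s.2.2.1), ("winless_streak", s.2.2.2)]

-- ===== PORT B =====
-- B helper: length of the trailing run of elements satisfying p (the reversed-scan loop of Source B).
def pvTrailing (rs : List Int) (p : Int → Bool) : Int :=
  ((rs.reverse.takeWhile p).length : Int)

def get_streak_stats_alt (results : List Int) : List (String × Int) :=
  [("win_streak", pvTrailing results (fun r => r == 1)),
   ("loss_streak", pvTrailing results (fun r => r == -1)),
   ("unbeaten_streak", pvTrailing results (fun r => r != -1)),
   ("winless_streak", pvTrailing results (fun r => r != 1))]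

-- ===== PRECONDITION & SPEC =====
def Spec_get_streak_stats (results : List Int) (out : List (String × Int)) : Prop := out = get_streak_stats_alt results
instance (results : List Int) (out : List (String × Int)) : Decidable (Spec_get_streak_stats results out) := by unfold Spec_get_streak_stats; infer_instance

-- ===== CLAIM (what is proved, stated in full; the proofs are below) =====
def Claim_equal_get_streak_stats : Prop := ∀ (results : List Int), Dom_get_streak_stats results → Spec_get_streak_stats results (get_streak_stats results)

-- ===== LEMMAS AND PROOFS =====

-- A's fold state after processing xs equals the four trailing-run lengths of xs.
theorem pv_fold_eq_trailing (xs : List Int) :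
    xs.foldl
      (fun (st : Int × Int × Int × Int) r =>
        if r = 1 then (st.1 + 1, 0, st.2.2.1 + 1, 0)
        else if r = -1 then (0, st.2.1 + 1, 0, st.2.2.2 + 1)
        else (0, 0, st.2.2.1 + 1, st.2.2.2 + 1))
      (0, 0, 0, 0)
    = (pvTrailing xs (fun r => r == 1), pvTrailing xs (fun r => r == -1),
       pvTrailing xs (fun r => r != -1), pvTrailing xs (fun r => r != 1)) := by
  induction xs using List.reverseRecOn with
  | nil => simp [pvTrailing]
  | append_singleton xs x ih =>
    rw [List.foldl_append, ih]
    simp only [List.foldl_cons, List.foldl_nil, pvTrailing, List.reverse_append,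
      List.reverse_singleton, List.singleton_append, List.takeWhile_cons]
    by_cases h1 : x = 1
    · simp [h1]
    · by_cases h2 : x = -1
      · simp [h2]
      · have b1 : (x == 1) = false := by simp [h1]
        have b2 : (x == -1) = false := by simp [h2]
        simp [h1, h2, b1, b2]

-- ===== VERDICT (by name: the statement is the Claim_ definition above) =====
theorem get_streak_stats_spec : Claim_equal_get_streak_stats := by
  intro results _
  show get_streak_stats results = get_streak_stats_alt results
  unfold get_streak_stats get_streak_stats_alt
  by_cases h : results = []
  · subst h; simp [pvTrailing]
  · simp only [h, if_false]
    rw [pv_fold_eq_trailing]
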